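-- pv_equiv track=rewrite | github.com/Tobywnkenobi/main-codeWars | Solo/Complete_Python/cw_9_10.py | best_friend
-- ===== SOURCE A (Python) =====
-- def best_friend(txt, a, b):
--     index = 0
--     while index < len(txt):
--         index = txt.find(a, index)
--         if index == -1:
--             break
--         if index == len(txt) - 1 or txt[index + 1] != b:
--             return False
--         index += 1
--     return True
-- ===== SOURCE B (Python) =====
-- def best_friend(txt, a, b):
--     # One reverse pass: an accumulator remembers whether the character just
--     # after the current position exists and equals b, so no lookahead/find.
--     follow_ok = False
--     result = True
--     for i in reversed(range(len(txt))):
--         if txt.startswith(a, i) and not follow_ok: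
--             result = False
--         follow_ok = txt[i] == b
--     return result
-- ===== Notes on version B (the rewrite author's own statement) =====
-- stated objective: alternative
-- what changed: Replaces A's forward find-and-test loop with a single right-to-left pass carrying an accumulator that remembers whether the character just after the current position equals b, eliminating both find() and the txt[i+1] lookahead.
import Mathlib
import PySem

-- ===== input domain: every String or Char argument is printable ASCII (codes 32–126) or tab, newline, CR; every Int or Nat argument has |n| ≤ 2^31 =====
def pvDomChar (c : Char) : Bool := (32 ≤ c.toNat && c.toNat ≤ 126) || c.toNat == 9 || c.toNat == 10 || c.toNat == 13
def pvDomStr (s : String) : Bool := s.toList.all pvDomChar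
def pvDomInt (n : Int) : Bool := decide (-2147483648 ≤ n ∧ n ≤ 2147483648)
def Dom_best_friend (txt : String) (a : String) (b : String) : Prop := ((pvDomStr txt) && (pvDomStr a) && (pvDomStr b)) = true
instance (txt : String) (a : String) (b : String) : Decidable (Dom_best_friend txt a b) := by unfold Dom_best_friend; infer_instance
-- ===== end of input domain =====

-- B replaces A's forward find-and-test loop with a single right-to-left pass whose
-- accumulator remembers whether the following character equals b; same cost, alternative structure.

-- ===== PORT A =====
-- A's while loop: index = txt.find(a, index); test; index += 1.  Recursion on s.length - i
-- (the found index is ≥ i, so i strictly increases).  Python's string comparison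
-- txt[index+1] != b is ported exactly as (singleton char list) ≠ b.toList.
def bfLoopA (s : List Char) (a : List Char) (b : List Char) (i : Nat) : Bool :=
  if h : i < s.length then
    let j := PySem.Chars.findFrom s a (i : Int) none
    if hj : j = -1 then true
    else if j = (s.length : Int) - 1 ∨ (PySem.List.pyGet? s (j + 1)).map (fun c => [c]) ≠ some b then
      false
    else bfLoopA s a b (j.toNat + 1)
  else true
termination_by s.length - i
decreasing_by
  have := (PySem.Chars.findFrom_natCast_spec s a i (Nat.le_of_lt h) hj).1
  omega

def best_friend (txt : String) (a : String) (b : String) : Bool :=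
  bfLoopA txt.toList a.toList b.toList 0

-- ===== PORT B =====
-- one iteration of B's reverse loop; state = (follow_ok, result)
def bfStep (s : List Char) (a : List Char) (b : List Char) (st : Bool × Bool) (i : Nat) : Bool × Bool :=
  let result := if PySem.Chars.startswith (s.drop i) a && !st.1 then false else st.2
  (decide ((PySem.List.pyGet? s (i : Int)).map (fun c => [c]) = some b), result)

def best_friend_alt (txt : String) (a : String) (b : String) : Bool :=
  let s := txt.toList
  (((List.range s.length).reverse).foldl (bfStep s a.toList b.toList) (false, true)).2

-- ===== PRECONDITION & SPEC =====
def Spec_best_friend (txt : String) (a : String) (b : String) (out : Bool) : Prop := out = best_friend_alt txt a b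
instance (txt : String) (a : String) (b : String) (out : Bool) : Decidable (Spec_best_friend txt a b out) := by unfold Spec_best_friend; infer_instance

-- ===== CLAIM (what is proved, stated in full; the proofs are below) =====
def Claim_equal_best_friend : Prop := ∀ (txt : String) (a : String) (b : String), Dom_best_friend txt a b → Spec_best_friend txt a b (best_friend txt a b)

-- ===== LEMMAS AND PROOFS =====

-- "index k passes A's test": k != len-1 and txt[k+1] == b
def okB (s : List Char) (b : List Char) (k : Nat) : Bool :=
  decide (k ≠ s.length - 1) &&
    decide ((PySem.List.pyGet? s ((k : Int) + 1)).map (fun c => [c]) = some b)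

-- the follow_ok accumulator's value when B is about to process index n-1:
-- "position n holds character b"
def fok (s : List Char) (b : List Char) (n : Nat) : Bool :=
  decide ((PySem.List.pyGet? s (n : Int)).map (fun c => [c]) = some b)

-- A's loop from index i returns True iff every match position k ≥ i passes okB.
lemma bfLoopA_iff (s a b : List Char) (i : Nat) :
    bfLoopA s a b i = true ↔
      ∀ k, i ≤ k → k < s.length → a <+: s.drop k → okB s b k = true := by
  suffices H : ∀ m i, s.length - i = m →
      (bfLoopA s a b i = true ↔
        ∀ k, i ≤ k → k < s.length → a <+: s.drop k → okB s b k = true) from H _ i rfl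
  intro m
  induction m using Nat.strong_induction_on with
  | _ m ih =>
    intro i hm
    by_cases h : i < s.length
    · rw [bfLoopA]
      by_cases hj : PySem.Chars.findFrom s a (i : Int) none = -1
      · -- no occurrence of a at or after i
        have hno : ¬ a <:+: s.drop i :=
          (PySem.Chars.findFrom_natCast_eq_neg_one_iff s a i (Nat.le_of_lt h)).mp hj
        simp only [h, dif_pos, hj, dif_pos]
        constructor
        · intro _ k hik hk hpre
          exfalso
          apply hno
          rw [← PySem.Chars.isIn_iff_infix, ← PySem.Chars.exists_prefix_drop_iff_isIn]
          exact ⟨k - i, by rw [List.drop_drop, Nat.add_sub_cancel' hik]; exact hpre⟩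
        · intro _; trivial
      · obtain ⟨h1, h2, h3⟩ :=
          PySem.Chars.findFrom_natCast_spec s a i (Nat.le_of_lt h) hj
        set j := PySem.Chars.findFrom s a (i : Int) none with hjdef
        have hj0 : 0 ≤ j := le_trans (by exact_mod_cast Int.natCast_nonneg i) h1
        have hJi : i ≤ j.toNat := by omega
        have hJlt : j.toNat < s.length := by
          by_contra hge
          have hnil : List.drop j.toNat s = [] := List.drop_eq_nil_of_le (by omega)
          have ha : a = [] := List.prefix_nil.mp (hnil ▸ h2)
          exact h3 i (le_refl i) (by omega) (ha ▸ List.nil_prefix)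
        have hjcast : j = (j.toNat : Int) := (Int.toNat_of_nonneg hj0).symm
        have hCok : (j = (s.length : Int) - 1 ∨
            (PySem.List.pyGet? s (j + 1)).map (fun c => [c]) ≠ some b) ↔
            okB s b j.toNat = false := by
          simp only [okB, Bool.and_eq_false_iff, decide_eq_false_iff_not, not_not]
          rw [hjcast]
          constructor
          · rintro (h' | h')
            · left; omega
            · right; intro hc; exact h' hc
          · rintro (h' | h')
            · left; omega
            · right; intro hc; exact h' hc
        by_cases hC : j = (s.length : Int) - 1 ∨
            (PySem.List.pyGet? s (j + 1)).map (fun c => [c]) ≠ some b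
        · -- the match at j.toNat fails the check: both sides are false
          simp only [h, dif_pos, hj, dif_neg, hC, if_pos, not_false_eq_true]
          constructor
          · intro hfalse; exact absurd hfalse (by simp)
          · intro hall
            have := hall j.toNat hJi hJlt h2
            rw [hCok.mp hC] at this; exact absurd this (by simp)
        · simp only [h, dif_pos, hj, dif_neg, hC, if_neg, not_false_eq_true]
          have hok : okB s b j.toNat = true := by
            rcases Bool.eq_false_or_eq_true (okB s b j.toNat) with ht | hf
            · exact ht
            · exact absurd (hCok.mpr hf) hC
          rw [ih (s.length - (j.toNat + 1)) (by omega) (j.toNat + 1) rfl]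
          constructor
          · intro hrest k hik hk hpre
            rcases Nat.lt_or_ge k (j.toNat) with hlt | hge
            · exact absurd hpre (h3 k hik hlt)
            · rcases Nat.eq_or_lt_of_le hge with heq | hlt
              · exact heq ▸ hok
              · exact hrest k hlt hk hpre
          · intro hall k hik hk hpre
            exact hall k (by omega) hk hpre
    · rw [bfLoopA]
      simp only [h, dif_neg, not_false_eq_true]
      constructor
      · intro _ k hik hk _; omega
      · intro _; trivial

-- one unfolding of B's reverse fold: peel the first-processed (largest) index
lemma foldl_range_reverse_succ {α : Type} (g : α → Nat → α) (st : α) (n : Nat) :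
    ((List.range (n + 1)).reverse).foldl g st =
      ((List.range n).reverse).foldl g (g st n) := by
  rw [List.range_succ, List.reverse_append]
  rfl

-- invariant for B's fold: entering with follow_ok = fok n, the final result is
-- the incoming result AND "every match position below n passes okB".
lemma okB_eq_fok (s b : List Char) (n : Nat) (hn : n < s.length) :
    okB s b n = fok s b (n + 1) := by
  have hcast : ((n : Int) + 1) = (((n + 1 : Nat)) : Int) := by push_cast; ring
  simp only [okB, fok, hcast, PySem.List.pyGet?_natCast]
  by_cases hlt : n + 1 < s.length
  · have h1 : n ≠ s.length - 1 := by omega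
    simp [h1]
  · have h1 : ¬ n ≠ s.length - 1 := by omega
    have hnone : s[n+1]? = none := by
      rw [List.getElem?_eq_none_iff]; omega
    simp [h1, hnone]

lemma bfFold_inv (s a b : List Char) (n : Nat) (hn : n ≤ s.length) (res : Bool) :
    (((List.range n).reverse).foldl (bfStep s a b) (fok s b n, res)).2 =
      (res && decide (∀ k, k < n → a <+: s.drop k → okB s b k = true)) := by
  induction n generalizing res with
  | zero => simp
  | succ n ih =>
    rw [foldl_range_reverse_succ]
    have hstep : bfStep s a b (fok s b (n + 1), res) n =
        (fok s b n, res && (!PySem.Chars.startswith (s.drop n) a || fok s b (n + 1))) := by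
      simp only [bfStep, fok]
      cases hs : PySem.Chars.startswith (s.drop n) a <;>
        cases hf : decide ((PySem.List.pyGet? s (((n + 1 : Nat)) : Int)).map (fun c => [c]) = some b) <;>
          simp_all
    rw [hstep, ih (Nat.le_of_succ_le hn)]
    have hfe : fok s b (n + 1) = okB s b n := (okB_eq_fok s b n (by omega)).symm
    have key : ((!PySem.Chars.startswith (s.drop n) a || fok s b (n + 1)) &&
        decide (∀ k, k < n → a <+: s.drop k → okB s b k = true)) =
        decide (∀ k, k < n + 1 → a <+: s.drop k → okB s b k = true) := by
      rw [hfe]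
      have hsucc : (∀ k, k < n + 1 → a <+: s.drop k → okB s b k = true) ↔
          ((a <+: s.drop n → okB s b n = true) ∧
            ∀ k, k < n → a <+: s.drop k → okB s b k = true) := by
        constructor
        · intro H; exact ⟨H n (by omega), fun k hk => H k (by omega)⟩
        · rintro ⟨h1, h2⟩ k hk
          rcases Nat.lt_succ_iff_lt_or_eq.mp hk with h | h
          · exact h2 k h
          · subst h; exact h1
      rw [Bool.eq_iff_iff]
      simp only [Bool.and_eq_true, Bool.or_eq_true, Bool.not_eq_true',
        decide_eq_true_eq, hsucc]
      constructor
      · rintro ⟨hc, h2⟩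
        refine ⟨fun hp => ?_, h2⟩
        rcases hc with hc | hc
        · exact absurd ((PySem.Chars.startswith_iff _ _).mpr hp) (by simp [hc])
        · exact hc
      · rintro ⟨h1, h2⟩
        refine ⟨?_, h2⟩
        by_cases hsw : PySem.Chars.startswith (s.drop n) a = true
        · right; exact h1 ((PySem.Chars.startswith_iff _ _).mp hsw)
        · left; simpa using hsw
    rw [← key]
    cases res <;> cases (!PySem.Chars.startswith (s.drop n) a || fok s b (n + 1)) <;> simp

-- ===== VERDICT (by name: the statement is the Claim_ definition above) =====
theorem best_friend_spec : Claim_equal_best_friend := by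
  intro txt a b _
  unfold Spec_best_friend
  have hfoklen : fok txt.toList b.toList txt.toList.length = false := by
    simp [fok, PySem.List.pyGet?, PySem.List.pyIdx?]
  have halt : best_friend_alt txt a b =
      decide (∀ k, k < txt.toList.length → a.toList <+: txt.toList.drop k →
        okB txt.toList b.toList k = true) := by
    unfold best_friend_alt
    rw [← hfoklen, bfFold_inv txt.toList a.toList b.toList txt.toList.length (le_refl _) true]
    simp
  have hAiff : best_friend txt a b = true ↔
      (∀ k, k < txt.toList.length → a.toList <+: txt.toList.drop k →
        okB txt.toList b.toList k = true) := by
    rw [best_friend, bfLoopA_iff]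
    exact ⟨fun H k hk hp => H k (Nat.zero_le k) hk hp, fun H k _ hk hp => H k hk hp⟩
  rw [halt]
  cases hA : best_friend txt a b
  · symm
    simp only [decide_eq_false_iff_not]
    intro hc
    have h' := hAiff.mpr hc
    rw [hA] at h'
    exact Bool.false_ne_true h'
  · symm
    simp only [decide_eq_true_eq]
    exact hAiff.mp hA
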